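-- pv_equiv track=rewrite | github.com/jgilles23/projectEuler | pe696.py | is_count_valid
-- ===== SOURCE A (Python) =====
-- def is_count_valid(n, s, hand):
--     count = {}
--     for tile in hand:
--         if tile in count:
--             count[tile] += 1
--         else:
--             count[tile] = 1
--     # Validate sum
--     for key in count:
--         if count[key] > 4:
--             return False
--     return True
-- ===== SOURCE B (Python) =====
-- def is_count_valid(n, s, hand):
--     srt = sorted(hand)
--     for i in range(4, len(srt)):
--         if srt[i] == srt[i - 4]:
--             return False
--     return True
-- ===== Notes on version B (the rewrite author's own statement) =====
-- stated objective: alternative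
-- what changed: Replaces the frequency dictionary and its second validation loop by sort-then-scan: after sorting, a tile occurs more than 4 times iff some element equals the element 4 positions earlier, so one window scan over the sorted hand decides validity with no counting at all.
import Mathlib
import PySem

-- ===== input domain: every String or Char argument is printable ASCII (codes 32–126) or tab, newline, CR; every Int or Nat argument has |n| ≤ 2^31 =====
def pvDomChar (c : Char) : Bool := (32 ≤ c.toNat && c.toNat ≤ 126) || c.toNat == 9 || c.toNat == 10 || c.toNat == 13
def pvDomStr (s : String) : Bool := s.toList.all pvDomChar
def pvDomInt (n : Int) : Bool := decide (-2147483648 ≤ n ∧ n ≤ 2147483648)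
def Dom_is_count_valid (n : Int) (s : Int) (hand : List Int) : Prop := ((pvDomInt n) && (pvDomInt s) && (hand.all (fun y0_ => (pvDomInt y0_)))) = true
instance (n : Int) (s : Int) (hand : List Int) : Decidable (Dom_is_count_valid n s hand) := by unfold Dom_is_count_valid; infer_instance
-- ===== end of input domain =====

-- B replaces the count dictionary and its validation loop with sort-then-scan: after
-- sorting, a tile occurs more than 4 times iff some element equals the one 4 positions
-- earlier (alternative algorithm, no counting).
-- ===== PORT A =====
def is_count_valid (n : Int) (s : Int) (hand : List Int) : Bool :=
  let count := hand.foldl (fun (d : PySem.Dict Int Int) tile =>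
    if d.contains tile then d.insert tile (d.getD tile 0 + 1) else d.insert tile 1)
    PySem.Dict.empty
  count.keys.all (fun key => !(decide (count.getD key 0 > 4)))

-- ===== PORT B =====
def is_count_valid_alt (n : Int) (s : Int) (hand : List Int) : Bool :=
  let srt := PySem.List.sorted hand (fun x => x) false
  (PySem.List.pyRange 4 srt.length 1).all (fun i =>
    !(PySem.List.pyGetD srt i 0 == PySem.List.pyGetD srt (i - 4) 0))

-- ===== PRECONDITION & SPEC =====
def Spec_is_count_valid (n : Int) (s : Int) (hand : List Int) (out : Bool) : Prop := out = is_count_valid_alt n s hand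
instance (n : Int) (s : Int) (hand : List Int) (out : Bool) : Decidable (Spec_is_count_valid n s hand out) := by unfold Spec_is_count_valid; infer_instance

-- ===== CLAIM (what is proved, stated in full; the proofs are below) =====
def Claim_equal_is_count_valid : Prop := ∀ (n : Int) (s : Int) (hand : List Int), Dom_is_count_valid n s hand → Spec_is_count_valid n s hand (is_count_valid n s hand)

-- ===== LEMMAS AND PROOFS =====

lemma fold_eq_counter (hand : List Int) :
    hand.foldl (fun (d : PySem.Dict Int Int) tile =>
      if d.contains tile then d.insert tile (d.getD tile 0 + 1) else d.insert tile 1)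
      PySem.Dict.empty = PySem.Dict.counter hand := by
  rw [← PySem.Dict.foldl_insert_getD_add_one_eq_counter]
  congr 1
  funext d tile
  by_cases h : d.contains tile = true
  · simp [h]
  · simp only [Bool.not_eq_true] at h
    simp [h, PySem.Dict.getD_of_not_contains _ _ h]

-- monotone element access in a (≤)-sorted list
lemma pairwise_le_getElem {l : List Int} (h : l.Pairwise (· ≤ ·))
    {p q : Nat} (hpq : p ≤ q) (hq : q < l.length) :
    l[p]'(Nat.lt_of_le_of_lt hpq hq) ≤ l[q] := by
  rcases Nat.lt_or_ge p q with hlt | hge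
  · exact (List.pairwise_iff_getElem.mp h) p q _ hq hlt
  · have : p = q := Nat.le_antisymm hpq hge
    subst this; exact le_refl _

-- first occurrence: x never occurs strictly before idxOf
lemma not_mem_take_idxOf (l : List Int) (x : Int) : x ∉ l.take (l.idxOf x) := by
  induction l with
  | nil => simp
  | cons a t ih =>
    by_cases hax : a = x
    · subst hax; simp [List.idxOf_cons_self]
    · have : (a :: t).idxOf x = t.idxOf x + 1 := by
        simp [List.idxOf_cons, hax]
      rw [this, List.take_succ_cons]
      intro hmem
      rcases List.mem_cons.mp hmem with h | h
      · exact hax h.symm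
      · exact ih h

-- the key characterisation: in a (≤)-sorted list, all counts ≤ 4 ↔ no element equals
-- the one 4 positions earlier
lemma sorted_count_le_iff (l : List Int) (hs : l.Pairwise (· ≤ ·)) :
    (∀ x ∈ l, l.count x ≤ 4) ↔
      (∀ k : Nat, (hk : k + 4 < l.length) →
        l[k + 4] ≠ l[k]'(by omega)) := by
  constructor
  · -- counts small → no 5-window of equal elements
    intro hcnt k hk heq
    set x := l[k]'(by omega) with hx
    have hall : ∀ j : Nat, (hj : j ≤ 4) → l[k + j]'(by omega) = x := by
      intro j hj
      have h1 : x ≤ l[k + j]'(by omega) := pairwise_le_getElem hs (by omega) (by omega)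
      have h2 : l[k + j]'(by omega) ≤ l[k + 4] := pairwise_le_getElem hs (by omega) hk
      omega
    have hrep : (l.drop k).take 5 = List.replicate 5 x := by
      apply List.ext_getElem
      · simp; omega
      · intro j h1 h2
        have hj : j < 5 := by simpa using h2
        rw [List.getElem_take, List.getElem_drop, List.getElem_replicate]
        exact hall j (by omega)
    have hsub : List.Sublist ((l.drop k).take 5) l :=
      List.Sublist.trans (List.take_sublist ..) (List.drop_sublist ..)
    have h5 : ((l.drop k).take 5).count x ≤ l.count x := hsub.count_le x
    rw [hrep, List.count_replicate_self] at h5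
    have := hcnt x (List.getElem_mem _)
    omega
  · -- no 5-window → all counts ≤ 4
    intro hwin x hmem
    by_contra hgt
    push_neg at hgt
    set i := l.idxOf x with hi
    have hilt : i < l.length := List.idxOf_lt_length_of_mem hmem
    -- count of x in the prefix before i is 0
    have htake : (l.take i).count x = 0 :=
      List.count_eq_zero.mpr (not_mem_take_idxOf l x)
    have hsplit : l.count x = (l.take i).count x + (l.drop i).count x := by
      conv_lhs => rw [← List.take_append_drop i l]
      rw [List.count_append]
    have hdropcnt : 5 ≤ (l.drop i).count x := by omega
    have hdlen : 5 ≤ (l.drop i).length :=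
      le_trans hdropcnt (List.count_le_length)
    have hklt : i + 4 < l.length := by
      have hdl : (l.drop i).length = l.length - i := by simp
      omega
    -- show l[i+4] = x, contradicting hwin at k = i
    have hix : l[i]'hilt = x := List.getElem_idxOf hilt
    have hle : x ≤ l[i + 4]'hklt := by
      have := pairwise_le_getElem hs (p := i) (q := i + 4) (by omega) hklt
      omega
    by_cases heq4 : l[i + 4]'hklt = x
    · exact hwin i hklt (by rw [heq4, hix])
    · -- then every element from position i+4 on exceeds x, so count x ≤ 4
      have hlt4 : x < l[i + 4]'hklt := lt_of_le_of_ne hle (fun h => heq4 h.symm)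
      have hnot : ∀ y ∈ (l.drop i).drop 4, y ≠ x := by
        intro y hy
        rcases List.mem_iff_getElem.mp hy with ⟨j, hjlt, hjy⟩
        have hdl2 : ((l.drop i).drop 4).length = l.length - i - 4 := by simp; omega
        rw [List.getElem_drop, List.getElem_drop] at hjy
        have hmono : l[i + 4]'hklt ≤ l[i + (4 + j)]'(by omega) :=
          pairwise_le_getElem hs (by omega) (by omega)
        intro hyx
        rw [← hjy] at hyx
        omega
      have hd0 : ((l.drop i).drop 4).count x = 0 := by
        apply List.count_eq_zero.mpr
        intro hmem'
        exact hnot x hmem' rfl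
      have hdsplit : (l.drop i).count x
          = ((l.drop i).take 4).count x + ((l.drop i).drop 4).count x := by
        conv_lhs => rw [← List.take_append_drop 4 (l.drop i)]
        rw [List.count_append]
      have ht4 : ((l.drop i).take 4).count x ≤ 4 := by
        have := List.count_le_length (a := x) (l := (l.drop i).take 4)
        have := (l.drop i).length_take (i := 4)
        omega
      omega

-- B's scan over pyRange, restated over Nat windows of the list
lemma scan_eq_window (l : List Int) :
    ((PySem.List.pyRange 4 l.length 1).all (fun i =>
      !(PySem.List.pyGetD l i 0 == PySem.List.pyGetD l (i - 4) 0)) = true) ↔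
      (∀ k : Nat, (hk : k + 4 < l.length) → l[k + 4] ≠ l[k]'(by omega)) := by
  rw [List.all_eq_true]
  constructor
  · intro h k hk
    have hkmem : ((k : Int) + 4) ∈ PySem.List.pyRange 4 l.length 1 := by
      rw [PySem.List.mem_pyRange_one]
      refine ⟨by omega, by push_cast; omega⟩
    have hthis := h _ hkmem
    simp only [Bool.not_eq_eq_eq_not, Bool.not_true, beq_eq_false_iff_ne, ne_eq] at hthis
    have e1 : PySem.List.pyGetD l ((k : Int) + 4) 0 = l[k + 4]'hk := by
      have hc : ((k : Int) + 4) = ((k + 4 : Nat) : Int) := by push_cast; ring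
      rw [hc, PySem.List.pyGetD_natCast, List.getD_eq_getElem?_getD,
        List.getElem?_eq_getElem hk]
      rfl
    have e2 : PySem.List.pyGetD l ((k : Int) + 4 - 4) 0 = l[k]'(by omega) := by
      have hc : ((k : Int) + 4 - 4) = ((k : Nat) : Int) := by push_cast; ring
      rw [hc, PySem.List.pyGetD_natCast, List.getD_eq_getElem?_getD,
        List.getElem?_eq_getElem (by omega : k < l.length)]
      rfl
    rw [e1, e2] at hthis
    exact hthis
  · intro h i hi
    rw [PySem.List.mem_pyRange_one] at hi
    obtain ⟨h4, hlen⟩ := hi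
    have hknat : ∃ k : Nat, (i : Int) = (k : Int) + 4 ∧ k + 4 < l.length := by
      refine ⟨(i - 4).toNat, by omega, by omega⟩
    obtain ⟨k, hik, hk⟩ := hknat
    subst hik
    have e1 : PySem.List.pyGetD l ((k : Int) + 4) 0 = l[k + 4]'hk := by
      have hc : ((k : Int) + 4) = ((k + 4 : Nat) : Int) := by push_cast; ring
      rw [hc, PySem.List.pyGetD_natCast, List.getD_eq_getElem?_getD,
        List.getElem?_eq_getElem hk]
      rfl
    have e2 : PySem.List.pyGetD l ((k : Int) + 4 - 4) 0 = l[k]'(by omega) := by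
      have hc : ((k : Int) + 4 - 4) = ((k : Nat) : Int) := by push_cast; ring
      rw [hc, PySem.List.pyGetD_natCast, List.getD_eq_getElem?_getD,
        List.getElem?_eq_getElem (by omega : k < l.length)]
      rfl
    simp only [Bool.not_eq_eq_eq_not, Bool.not_true, beq_eq_false_iff_ne, ne_eq]
    rw [e1, e2]
    exact h k hk

-- ===== VERDICT (by name: the statement is the Claim_ definition above) =====
theorem is_count_valid_spec : Claim_equal_is_count_valid := by
  intro n s hand _
  unfold Spec_is_count_valid
  rw [Bool.eq_iff_iff]
  unfold is_count_valid
  rw [fold_eq_counter]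
  simp only [List.all_eq_true, PySem.Dict.getD_counter, PySem.Dict.keys_counter,
    PySem.Set.mem_ofList, Bool.not_eq_true', decide_eq_false_iff_not]
  rw [show is_count_valid_alt n s hand
      = (PySem.List.pyRange 4 (PySem.List.sorted hand (fun x => x) false).length 1).all
          (fun i => !(PySem.List.pyGetD (PySem.List.sorted hand (fun x => x) false) i 0
            == PySem.List.pyGetD (PySem.List.sorted hand (fun x => x) false) (i - 4) 0))
    from rfl]
  rw [scan_eq_window]
  have hperm : (PySem.List.sorted hand (fun x => x) false).Perm hand :=
    PySem.List.sorted_perm hand (fun x => x) false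
  have hpw : (PySem.List.sorted hand (fun x => x) false).Pairwise (· ≤ ·) := by
    have hp := PySem.List.sorted_pairwise hand (fun x => x)
    simpa using hp
  rw [← sorted_count_le_iff _ hpw]
  constructor
  · intro h x hx
    have hA := h x (hperm.mem_iff.mp hx)
    have hc := hperm.count_eq x
    omega
  · intro h x hx
    have hB := h x (hperm.mem_iff.mpr hx)
    have hc := hperm.count_eq x
    omega
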